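-- pv_equiv track=rewrite | github.com/mexyusef/fmustools | fmuslang/schnell/db/search.py | search_algo1
-- ===== SOURCE A (Python) =====
-- def search_algo1(tempres, keylist):
--     result = sorted(
--         tempres,
--         key=lambda item: len(  # utamakan nama file .mk sama dg salah satu item cari
--             [
--                 elem
--                 for elem in keylist
--                 if elem == item.split(":")[0].split("/")[-1].removesuffix(".mk")
--             ]
--         )
--         +  # utamakan salah satu item cari sama dengan nama baris_cari (split(:)[1])
--         # yg sengaja kita sediakan agar dia ter searched
--         len([elem for elem in keylist if elem == item.split(":")[1]])
--         + len(  # utamakan nama file .mk dimulai dg salah satu item cari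
--             [
--                 elem
--                 for elem in keylist
--                 if item.split(":")[0]
--                 .split("/")[-1]
--                 .removesuffix(".mk")
--                 .startswith(elem)
--             ]
--         )
--         + len(  # utamakan semua item cari ada di filepath
--             [elem for elem in keylist if elem in item.split(":")[0]]
--         )
--         + len(  # utamakan nama folder berisi file .mk sama dg salah satu item cari
--             [
--                 elem
--                 for elem in keylist
--                 if elem == item.split(":")[0].split("/")[-2].removesuffix(".mk")
--             ]
--         ),
--         reverse=True,
--     )
--
--     return result
-- ===== SOURCE B (Python) =====
-- def search_algo1(tempres, keylist):
--     # Bucket (counting) sort by score: group items by score once, then emit the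
--     # buckets from highest score down; no comparison sort of items.
--     if not keylist:
--         return list(tempres)
--     buckets = {}
--     for item in tempres:
--         path, line = item.split(":")[0], item.split(":")[1]
--         parts = path.split("/")
--         fname = parts[-1].removesuffix(".mk")
--         folder = parts[-2].removesuffix(".mk")
--         score = 0
--         for elem in keylist:
--             score += ((elem == fname) + (elem == line) + fname.startswith(elem)
--                       + (elem in path) + (elem == folder))
--         buckets.setdefault(score, []).append(item)
--     out = []
--     for s in sorted(buckets, reverse=True):
--         out += buckets[s]
--     return out
-- ===== Notes on version B (the rewrite author's own statement) =====
-- stated objective: alternative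
-- what changed: A comparison-sorts the items with a five-comprehension composite key; B instead computes each item's score once, groups the items into score buckets with a dict, and emits the buckets from the highest score down (a stable bucket/counting sort, no comparison sort of items).
import Mathlib
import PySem

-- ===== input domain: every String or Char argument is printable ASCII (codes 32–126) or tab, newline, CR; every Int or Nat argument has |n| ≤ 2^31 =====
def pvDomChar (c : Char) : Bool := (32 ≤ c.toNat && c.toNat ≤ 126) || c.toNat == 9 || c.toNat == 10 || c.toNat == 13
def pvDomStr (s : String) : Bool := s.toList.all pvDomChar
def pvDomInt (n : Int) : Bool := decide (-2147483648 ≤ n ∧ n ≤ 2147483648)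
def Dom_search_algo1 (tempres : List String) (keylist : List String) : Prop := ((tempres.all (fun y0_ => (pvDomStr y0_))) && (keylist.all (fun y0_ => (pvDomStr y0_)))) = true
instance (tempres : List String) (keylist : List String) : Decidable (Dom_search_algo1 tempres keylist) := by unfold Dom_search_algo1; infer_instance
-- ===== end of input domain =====

-- B replaces A's comparison sort with a stable bucket (counting) sort: it groups the items
-- by their score in one dict pass and emits the buckets from highest score down.
-- (Neither version mutates its arguments; sorted returns a fresh list.)

-- ===== PORT A =====

-- hand port of str.removesuffix(".mk"): Python drops the suffix iff the string ends with it
-- (suffix is the nonempty literal ".mk", so this is exact).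
def pvRmMk (cs : List Char) : List Char :=
  if PySem.Chars.endswith cs ".mk".toList then cs.take (cs.length - 3) else cs

-- A's sort key: the five comprehension lengths, each re-splitting item (indexing via pyGet?,
-- defaulted to [] — Python raises exactly where pyGet? is none, excluded by Pre_).
def pvKeyA (keylist : List String) (item : String) : Int :=
  ((keylist.filter (fun elem =>
      elem.toList == pvRmMk ((PySem.List.pyGet? (PySem.Chars.splitOn ((PySem.List.pyGet? (PySem.Chars.splitOn item.toList [':']) 0).getD []) ['/']) (-1)).getD []))).length : Int)
  + ((keylist.filter (fun elem =>
      elem.toList == (PySem.List.pyGet? (PySem.Chars.splitOn item.toList [':']) 1).getD [])).length : Int)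
  + ((keylist.filter (fun elem =>
      PySem.Chars.startswith (pvRmMk ((PySem.List.pyGet? (PySem.Chars.splitOn ((PySem.List.pyGet? (PySem.Chars.splitOn item.toList [':']) 0).getD []) ['/']) (-1)).getD [])) elem.toList)).length : Int)
  + ((keylist.filter (fun elem =>
      PySem.Chars.isIn elem.toList ((PySem.List.pyGet? (PySem.Chars.splitOn item.toList [':']) 0).getD []))).length : Int)
  + ((keylist.filter (fun elem =>
      elem.toList == pvRmMk ((PySem.List.pyGet? (PySem.Chars.splitOn ((PySem.List.pyGet? (PySem.Chars.splitOn item.toList [':']) 0).getD []) ['/']) (-2)).getD []))).length : Int)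

def search_algo1 (tempres : List String) (keylist : List String) : List String :=
  PySem.List.sorted tempres (pvKeyA keylist) true

-- ===== PORT B =====

-- B's score of one item: split once, one loop over keylist adding the five indicators.
def pvScoreB (keylist : List String) (item : String) : Int :=
  let path := (PySem.List.pyGet? (PySem.Chars.splitOn item.toList [':']) 0).getD []
  let line := (PySem.List.pyGet? (PySem.Chars.splitOn item.toList [':']) 1).getD []
  let parts := PySem.Chars.splitOn path ['/']
  let fname := pvRmMk ((PySem.List.pyGet? parts (-1)).getD [])
  let folder := pvRmMk ((PySem.List.pyGet? parts (-2)).getD [])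
  keylist.foldl (fun s elem =>
    s + ((if elem.toList == fname then 1 else 0)
       + (if elem.toList == line then 1 else 0)
       + (if PySem.Chars.startswith fname elem.toList then 1 else 0)
       + (if PySem.Chars.isIn elem.toList path then 1 else 0)
       + (if elem.toList == folder then 1 else 0))) 0

-- B: group items into score buckets (dict, setdefault/append = Dict.modify), then emit the
-- buckets from the highest score down.
def search_algo1_alt (tempres : List String) (keylist : List String) : List String :=
  if keylist.isEmpty then tempres
  else
    let buckets := tempres.foldl
      (fun d item => PySem.Dict.modify d (pvScoreB keylist item) [] (fun vs => vs ++ [item]))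
      PySem.Dict.empty
    (PySem.List.sorted (PySem.Dict.keys buckets) (fun s => s) true).foldl
      (fun out s => out ++ PySem.Dict.getD buckets s []) []

-- ===== PRECONDITION & SPEC =====
-- With a nonempty keylist, Python A (and B) raise IndexError on an item without ':' or whose
-- part before the first ':' has no '/'; Pre_ excludes exactly those inputs.
def Pre_search_algo1 (tempres : List String) (keylist : List String) : Prop :=
  keylist = [] ∨ ∀ item ∈ tempres,
    2 ≤ (PySem.Chars.splitOn item.toList [':']).length ∧
    2 ≤ (PySem.Chars.splitOn ((PySem.Chars.splitOn item.toList [':']).headD []) ['/']).length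

instance (tempres : List String) (keylist : List String) : Decidable (Pre_search_algo1 tempres keylist) := by
  unfold Pre_search_algo1; infer_instance

def pvWitness_search_algo1 : List String × List String :=
  (["src/main.mk:build", "lib/util.mk:test"], ["main", "x"])

def Spec_search_algo1 (tempres : List String) (keylist : List String) (out : List String) : Prop := out = search_algo1_alt tempres keylist
instance (tempres : List String) (keylist : List String) (out : List String) : Decidable (Spec_search_algo1 tempres keylist out) := by unfold Spec_search_algo1; infer_instance

-- ===== CLAIM (what is proved, stated in full; the proofs are below) =====
def Claim_equal_search_algo1 : Prop := ∀ (tempres : List String) (keylist : List String), Dom_search_algo1 tempres keylist → Pre_search_algo1 tempres keylist → Spec_search_algo1 tempres keylist (search_algo1 tempres keylist)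

-- ===== LEMMAS AND PROOFS =====

-- One fold accumulating five indicator sums equals the sum of the five filter lengths.
theorem foldl_five_ind (l : List String) (p1 p2 p3 p4 p5 : String → Bool) (n : Int) :
    l.foldl (fun s e =>
      s + ((if p1 e then 1 else 0) + (if p2 e then 1 else 0) + (if p3 e then 1 else 0)
        + (if p4 e then 1 else 0) + (if p5 e then 1 else 0))) n
    = n + ((l.filter p1).length : Int) + ((l.filter p2).length : Int)
        + ((l.filter p3).length : Int) + ((l.filter p4).length : Int)
        + ((l.filter p5).length : Int) := by
  induction l generalizing n with
  | nil => simp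
  | cons a t ih =>
      simp only [List.foldl_cons, List.filter_cons, ih]
      by_cases h1 : p1 a <;> by_cases h2 : p2 a <;> by_cases h3 : p3 a <;>
        by_cases h4 : p4 a <;> by_cases h5 : p5 a <;>
        simp [h1, h2, h3, h4, h5] <;> omega

theorem key_eq (keylist : List String) (item : String) :
    pvKeyA keylist item = pvScoreB keylist item := by
  unfold pvKeyA pvScoreB
  simp only [foldl_five_ind]
  ring

-- sorted over a snoc inserts the last element into the sorted prefix.
theorem sorted_rev_snoc {α : Type} (k : α → Int) (xs : List α) (x : α) :
    PySem.List.sorted (xs ++ [x]) k true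
      = PySem.List.insertBy (fun a b => decide (k b < k a)) x (PySem.List.sorted xs k true) := by
  rw [PySem.List.sorted_rev_eq_foldl_insertBy, PySem.List.sorted_rev_eq_foldl_insertBy,
    List.foldl_append]
  rfl

theorem insertBy_append_left {α : Type} (before : α → α → Bool) (x : α) (A S : List α)
    (h : ∀ y ∈ A, before x y = false) :
    PySem.List.insertBy before x (A ++ S) = A ++ PySem.List.insertBy before x S := by
  induction A with
  | nil => rfl
  | cons a t ih =>
      have ha : before x a = false := h a (List.mem_cons_self)
      have step : PySem.List.insertBy before x (a :: (t ++ S))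
          = if before x a then x :: a :: (t ++ S)
            else a :: PySem.List.insertBy before x (t ++ S) := rfl
      simp only [List.cons_append, step, ha, Bool.false_eq_true, if_false]
      rw [ih (fun y hy => h y (List.mem_cons_of_mem a hy))]

theorem insertBy_cons_of_before {α : Type} (before : α → α → Bool) (x : α) (S : List α)
    (h : ∀ y ∈ S, before x y = true) :
    PySem.List.insertBy before x S = x :: S := by
  cases S with
  | nil => rfl
  | cons z zs => simp [PySem.List.insertBy, h z (List.mem_cons_self)]

-- Stable descending sort peels off the maximal-key group (in original order) first.
theorem sorted_rev_max_group {α : Type} (k : α → Int) (xs : List α) (m : Int)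
    (h : ∀ x ∈ xs, k x ≤ m) :
    PySem.List.sorted xs k true
      = xs.filter (fun x => k x == m)
        ++ PySem.List.sorted (xs.filter (fun x => !(k x == m))) k true := by
  induction xs using List.reverseRecOn with
  | nil => rfl
  | append_singleton ys x ih =>
      have hys : ∀ y ∈ ys, k y ≤ m := fun y hy => h y (List.mem_append_left _ hy)
      have hx : k x ≤ m := h x (List.mem_append_right _ (List.mem_cons_self))
      have hA : ∀ y ∈ ys.filter (fun y => k y == m),
          (fun a b => decide (k b < k a)) x y = false := by
        intro y hy
        have := (List.mem_filter.mp hy).2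
        simp only [beq_iff_eq] at this
        simp [this]; omega
      rw [sorted_rev_snoc, ih hys, insertBy_append_left _ _ _ _ hA]
      by_cases hxm : k x = m
      · have hS : ∀ y ∈ PySem.List.sorted (ys.filter (fun y => !(k y == m))) k true,
            (fun a b => decide (k b < k a)) x y = true := by
          intro y hy
          have hy' := ((PySem.List.mem_sorted _ _ _ _).mp hy)
          have h1 := hys y (List.mem_of_mem_filter hy')
          have h2 := (List.mem_filter.mp hy').2
          simp only [Bool.not_eq_eq_eq_not, Bool.not_true, beq_eq_false_iff_ne, ne_eq] at h2
          simp [hxm]; omega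
        rw [insertBy_cons_of_before _ _ _ hS]
        simp [List.filter_append, hxm]
      · rw [← sorted_rev_snoc]
        simp [List.filter_append, hxm]

-- A stable descending sort is the concatenation, over any strictly descending list of keys
-- covering all keys, of the original-order key groups.
theorem sorted_rev_eq_flatMap_groups {α : Type} (k : α → Int) :
    ∀ (ks : List Int) (xs : List α), ks.Pairwise (fun a b => b < a) →
      (∀ x ∈ xs, k x ∈ ks) →
      PySem.List.sorted xs k true = ks.flatMap (fun s => xs.filter (fun x => k x == s)) := by
  intro ks
  induction ks with
  | nil =>
      intro xs _ hin
      have : xs = [] := by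
        cases xs with
        | nil => rfl
        | cons a t => exact absurd (hin a List.mem_cons_self) (List.not_mem_nil)
      subst this; rfl
  | cons m rest ih =>
      intro xs hp hin
      have hlt : ∀ s ∈ rest, s < m := fun s hs => (List.pairwise_cons.mp hp).1 s hs
      have hle : ∀ x ∈ xs, k x ≤ m := by
        intro x hx
        rcases List.mem_cons.mp (hin x hx) with h | h
        · exact le_of_eq h
        · exact le_of_lt (hlt _ h)
      rw [sorted_rev_max_group k xs m hle]
      have hin' : ∀ x ∈ xs.filter (fun x => !(k x == m)), k x ∈ rest := by
        intro x hx
        have h1 := hin x (List.mem_of_mem_filter hx)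
        have h2 := (List.mem_filter.mp hx).2
        simp only [Bool.not_eq_eq_eq_not, Bool.not_true, beq_eq_false_iff_ne, ne_eq] at h2
        rcases List.mem_cons.mp h1 with h | h
        · exact absurd h h2
        · exact h
      rw [ih (xs.filter (fun x => !(k x == m))) (List.pairwise_cons.mp hp).2 hin']
      rw [List.flatMap_cons]
      congr 1
      apply List.flatMap_congr
      intro s hs
      rw [List.filter_filter]
      apply List.filter_congr
      intro x _
      by_cases hxs : k x = s
      · have hsm : ¬ (s = m) := by have := hlt s hs; omega
        simp [hxs, hsm]
      · simp [hxs]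

-- the bucket dict's lookups and keys
theorem buckets_getD (tempres : List String) (f : String → Int) (c : Int) :
    PySem.Dict.getD (tempres.foldl
        (fun d item => PySem.Dict.modify d (f item) [] (fun vs => vs ++ [item]))
        PySem.Dict.empty) c []
      = tempres.filter (fun it => f it == c) := by
  have h : tempres.foldl
      (fun d item => PySem.Dict.modify d (f item) [] (fun vs => vs ++ [item]))
      PySem.Dict.empty
      = (tempres.map (fun it => (f it, it))).foldl
          (fun d p => PySem.Dict.modify d p.1 [] (fun vs => vs ++ [p.2])) PySem.Dict.empty := by
    rw [List.foldl_map]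
  rw [h, PySem.Dict.getD_foldl_modify_append, PySem.Dict.getD_empty]
  rw [List.filter_map, List.map_map]
  simp [Function.comp_def]

theorem buckets_keys (tempres : List String) (f : String → Int) :
    (tempres.foldl
        (fun d item => PySem.Dict.modify d (f item) [] (fun vs => vs ++ [item]))
        PySem.Dict.empty).keys
      = PySem.Set.ofList (tempres.map f) := by
  rw [PySem.Dict.keys_foldl_modify_key]
  simp [PySem.Dict.keys_empty, PySem.Set.update, PySem.Set.ofList_eq_foldl]

theorem search_algo1_eq (tempres keylist : List String) :
    search_algo1 tempres keylist = search_algo1_alt tempres keylist := by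
  unfold search_algo1 search_algo1_alt
  have hkey : pvKeyA keylist = pvScoreB keylist := funext (key_eq keylist)
  rw [hkey]
  by_cases hk : keylist.isEmpty
  · -- empty keylist: every score is 0, the stable sort returns the list unchanged
    rw [List.isEmpty_iff] at hk
    subst hk
    simp only [List.isEmpty_nil, if_true]
    apply PySem.List.sorted_rev_eq_self_of_pairwise
    apply List.pairwise_of_forall
    intro a b
    simp [pvScoreB]
  · simp only [hk, Bool.false_eq_true, if_false]
    set f := pvScoreB keylist with hf
    set B := tempres.foldl
      (fun d item => PySem.Dict.modify d (f item) [] (fun vs => vs ++ [item]))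
      PySem.Dict.empty with hB
    have hnodup : B.keys.Nodup := by
      rw [hB]
      exact PySem.Dict.nodup_keys_foldl_modify_key tempres f []
        (fun d item vs => vs ++ [item]) PySem.Dict.empty
        (by simp [PySem.Dict.keys_empty])
    set ks := PySem.List.sorted B.keys (fun s => s) true with hks
    have hksnd : ks.Nodup := ((PySem.List.sorted_perm B.keys _ _).nodup_iff).mpr hnodup
    have hksle : ks.Pairwise (fun a b => b ≤ a) := PySem.List.sorted_pairwise_rev B.keys _
    have hkslt : ks.Pairwise (fun a b => b < a) := by
      have := hksle.and hksnd
      exact this.imp (fun h => lt_of_le_of_ne h.1 (Ne.symm h.2))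
    have hin : ∀ x ∈ tempres, f x ∈ ks := by
      intro x hx
      rw [hks, PySem.List.mem_sorted, hB, buckets_keys, PySem.Set.mem_ofList]
      exact List.mem_map_of_mem hx
    rw [sorted_rev_eq_flatMap_groups f ks tempres hkslt hin]
    rw [PySem.List.foldl_append_eq_flatMap]
    apply List.flatMap_congr
    intro s _
    rw [hB, buckets_getD]

-- ===== VERDICT (by name: the statement is the Claim_ definition above) =====
theorem search_algo1_spec : Claim_equal_search_algo1 := by
  intro tempres keylist _ _
  unfold Spec_search_algo1
  exact search_algo1_eq tempres keylist
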